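-- pv_equiv track=rewrite | github.com/renta0426/NVIDIA-Nemotron-Model-Reasoning-Challenge | code/Nemotron Reasoning Challenge - QLoRA Baseline.py | decode_with_mapping
-- ===== SOURCE A (Python) =====
-- def decode_with_mapping(text: str, mapping: dict[str, str]) -> str | None:
--     decoded: list[str] = []
--     for char in text:
--         if char == ' ':
--             decoded.append(char)
--             continue
--         if char not in mapping:
--             return None
--         decoded.append(mapping[char])
--     return ''.join(decoded)
-- ===== SOURCE B (Python) =====
-- def decode_with_mapping(text: str, mapping: dict[str, str]) -> str | None:
--     # two-pass: validate first, then build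
--     if any(c != ' ' and c not in mapping for c in text):
--         return None
--     return ''.join(c if c == ' ' else mapping[c] for c in text)
-- ===== Notes on version B (the rewrite author's own statement) =====
-- stated objective: simpler
-- what changed: Replaced A's interleaved single-pass loop with early return by a two-pass scan-then-build decomposition: one validation pass (any), then a join over a comprehension.
import Mathlib
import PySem

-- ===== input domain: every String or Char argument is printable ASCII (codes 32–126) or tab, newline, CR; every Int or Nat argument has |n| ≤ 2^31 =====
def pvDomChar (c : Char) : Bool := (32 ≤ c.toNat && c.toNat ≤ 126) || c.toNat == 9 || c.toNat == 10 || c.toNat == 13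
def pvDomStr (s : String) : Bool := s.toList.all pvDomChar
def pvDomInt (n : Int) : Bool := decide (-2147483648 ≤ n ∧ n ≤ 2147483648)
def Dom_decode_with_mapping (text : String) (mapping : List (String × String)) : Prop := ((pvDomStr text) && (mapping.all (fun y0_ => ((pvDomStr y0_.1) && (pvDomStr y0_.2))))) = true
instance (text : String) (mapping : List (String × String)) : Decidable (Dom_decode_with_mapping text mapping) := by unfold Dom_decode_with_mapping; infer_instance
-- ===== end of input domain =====

-- B replaces A's interleaved single-pass loop with early return by a two-pass
-- scan-then-build decomposition (validate, then map+join); same O(n) cost (objective: simpler).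


-- dict lookup on the association list: first match (char keys are one-char strings)
def pvLookup (mapping : List (String × String)) (k : String) : Option String :=
  (mapping.find? (fun p => p.1 == k)).map (·.2)

-- ===== PORT A =====
-- the for-loop over text with the accumulator `decoded` and early return
def pvDecodeLoopA (mapping : List (String × String)) : List Char → List String → Option String
  | [], acc => some (PySem.Str.join "" acc)
  | c :: cs, acc =>
    if c = ' ' then pvDecodeLoopA mapping cs (acc ++ [String.singleton c])
    else
      match pvLookup mapping (String.singleton c) with
      | none => none
      | some v => pvDecodeLoopA mapping cs (acc ++ [v])

def decode_with_mapping (text : String) (mapping : List (String × String)) : Option String :=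
  pvDecodeLoopA mapping text.toList []

-- ===== PORT B =====
-- validation pass predicate: c != ' ' and c not in mapping
def pvBad (mapping : List (String × String)) (c : Char) : Bool :=
  (c ≠ ' ') && (pvLookup mapping (String.singleton c)).isNone

-- build pass: c if c == ' ' else mapping[c]  (lookup guaranteed by the validation pass)
def pvBuild (mapping : List (String × String)) (c : Char) : String :=
  if c = ' ' then String.singleton c else (pvLookup mapping (String.singleton c)).getD ""

def decode_with_mapping_alt (text : String) (mapping : List (String × String)) : Option String :=
  if text.toList.any (pvBad mapping) then none
  else some (PySem.Str.join "" (text.toList.map (pvBuild mapping)))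

-- ===== PRECONDITION & SPEC =====
def Spec_decode_with_mapping (text : String) (mapping : List (String × String)) (out : Option String) : Prop := out = decode_with_mapping_alt text mapping
instance (text : String) (mapping : List (String × String)) (out : Option String) : Decidable (Spec_decode_with_mapping text mapping out) := by unfold Spec_decode_with_mapping; infer_instance

-- ===== CLAIM (what is proved, stated in full; the proofs are below) =====
def Claim_equal_decode_with_mapping : Prop := ∀ (text : String) (mapping : List (String × String)), Dom_decode_with_mapping text mapping → Spec_decode_with_mapping text mapping (decode_with_mapping text mapping)

-- ===== LEMMAS AND PROOFS =====
lemma pvDecodeLoopA_eq (mapping : List (String × String)) (cs : List Char) (acc : List String) :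
    pvDecodeLoopA mapping cs acc =
      if cs.any (pvBad mapping) then none
      else some (PySem.Str.join "" (acc ++ cs.map (pvBuild mapping))) := by
  induction cs generalizing acc with
  | nil => simp [pvDecodeLoopA]
  | cons c cs ih =>
    by_cases hc : c = ' '
    · simp [pvDecodeLoopA, hc, pvBad, pvBuild, ih, List.append_assoc]
    · cases hv : pvLookup mapping (String.singleton c) with
      | none => simp [pvDecodeLoopA, hc, pvBad, hv]
      | some v =>
        simp [pvDecodeLoopA, hc, pvBad, pvBuild, hv, ih, List.append_assoc]

-- ===== VERDICT (by name: the statement is the Claim_ definition above) =====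
theorem decode_with_mapping_spec : Claim_equal_decode_with_mapping := by
  intro text mapping _
  unfold Spec_decode_with_mapping decode_with_mapping decode_with_mapping_alt
  rw [pvDecodeLoopA_eq]
  simp
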